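-- pv_equiv track=rewrite | github.com/GitdohunKim/boj-programmers-solution | 백준/Gold/2143. 두 배열의 합/두 배열의 합.py | make_prefix_sum
-- ===== SOURCE A (Python) =====
-- def make_prefix_sum(target_arr):
--     prefix = target_arr[:]
--
--     for i in range(1, len(prefix)):
--         prefix[i] += prefix[i-1]
--
--     answer = prefix[:]
--     for i in range(len(prefix)):
--         for j in range(i + 1, len(prefix)):
--             answer.append(prefix[j] - prefix[i])
--
--     return sorted(answer)
-- ===== SOURCE B (Python) =====
-- def make_prefix_sum(target_arr):
--     answer = []
--     for i in range(len(target_arr)):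
--         s = 0
--         for j in range(i, len(target_arr)):
--             s += target_arr[j]
--             answer.append(s)
--     return sorted(answer)
-- ===== Notes on version B (the rewrite author's own statement) =====
-- stated objective: simpler
-- what changed: Drops A's cumulative prefix-sum table and the prefix[j]-prefix[i] subtraction pass; B accumulates each subarray sum directly with a running total in a plain nested loop.
import Mathlib
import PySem

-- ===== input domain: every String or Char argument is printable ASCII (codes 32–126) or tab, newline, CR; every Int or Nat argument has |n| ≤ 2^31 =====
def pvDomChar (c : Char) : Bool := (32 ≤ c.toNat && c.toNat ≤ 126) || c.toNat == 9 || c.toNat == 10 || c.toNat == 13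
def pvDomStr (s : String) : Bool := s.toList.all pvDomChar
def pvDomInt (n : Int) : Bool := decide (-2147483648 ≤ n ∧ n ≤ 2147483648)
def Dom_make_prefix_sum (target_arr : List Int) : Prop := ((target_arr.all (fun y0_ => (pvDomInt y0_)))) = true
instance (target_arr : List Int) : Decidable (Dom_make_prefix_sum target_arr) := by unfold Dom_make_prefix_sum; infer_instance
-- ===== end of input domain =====

-- B replaces A's pref-sum table and subtraction pass by direct accumulation of each
-- contiguous subarray sum in a nested loop (objective: simpler; return value only, no mutation involved).

-- ===== PORT A =====
def make_prefix_sum (target_arr : List Int) : List Int :=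
  let pref0 := PySem.List.slice target_arr none none
  let pref :=
    (PySem.List.pyRange 1 (PySem.List.len pref0) 1).foldl
      (fun p i => PySem.List.pySetD p i (PySem.List.pyGetD p i 0 + PySem.List.pyGetD p (i-1) 0))
      pref0
  let answer0 := PySem.List.slice pref none none
  let answer :=
    (PySem.List.pyRange 0 (PySem.List.len pref) 1).foldl
      (fun acc i =>
        (PySem.List.pyRange (i+1) (PySem.List.len pref) 1).foldl
          (fun acc2 j => acc2 ++ [PySem.List.pyGetD pref j 0 - PySem.List.pyGetD pref i 0])
          acc)
      answer0
  PySem.List.sorted answer (fun x => x) false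

-- ===== PORT B =====
def make_prefix_sum_alt (target_arr : List Int) : List Int :=
  let answer :=
    (PySem.List.pyRange 0 (PySem.List.len target_arr) 1).foldl
      (fun acc i =>
        ((PySem.List.pyRange i (PySem.List.len target_arr) 1).foldl
          (fun (st : List Int × Int) j =>
            (st.1 ++ [st.2 + PySem.List.pyGetD target_arr j 0],
             st.2 + PySem.List.pyGetD target_arr j 0))
          (acc, 0)).1)
      []
  PySem.List.sorted answer (fun x => x) false

-- ===== PRECONDITION & SPEC =====
def Spec_make_prefix_sum (target_arr : List Int) (out : List Int) : Prop := out = make_prefix_sum_alt target_arr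
instance (target_arr : List Int) (out : List Int) : Decidable (Spec_make_prefix_sum target_arr out) := by unfold Spec_make_prefix_sum; infer_instance

-- ===== CLAIM (what is proved, stated in full; the proofs are below) =====
def Claim_equal_make_prefix_sum : Prop := ∀ (target_arr : List Int), Dom_make_prefix_sum target_arr → Spec_make_prefix_sum target_arr (make_prefix_sum target_arr)

-- ===== LEMMAS AND PROOFS =====

-- sum of the first k elements of t
def pvS (t : List Int) (k : Nat) : Int := (t.take k).sum

-- the prefix-sum table as a function of an Int index, pvF t j = t[0]+...+t[j]
def pvF (t : List Int) (j : Int) : Int := pvS t (j.toNat + 1)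

-- the list of values B's inner loop appends, starting from running sum s
def pvG (f : Int → Int) : List Int → Int → List Int
  | [], _ => []
  | j :: js, s => (s + f j) :: pvG f js (s + f j)

lemma pvS_succ (t : List Int) (m : Nat) (h : m < t.length) :
    pvS t (m + 1) = pvS t m + t[m] := by
  unfold pvS
  exact List.sum_take_succ t m h

-- A's destructive prefix loop computes the prefix-sum table
lemma pv_prefA_aux (t : List Int) : ∀ (m : Nat), m ≤ t.length →
    (PySem.List.pyRange 1 (m : Int) 1).foldl
      (fun p i => PySem.List.pySetD p i (PySem.List.pyGetD p i 0 + PySem.List.pyGetD p (i-1) 0)) t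
    = (List.range m).map (fun k => pvS t (k+1)) ++ t.drop m := by
  intro m
  induction m with
  | zero => intro _; simp [PySem.List.pyRange_one_eq_nil]
  | succ m ih =>
    intro hm
    rcases Nat.eq_zero_or_pos m with hm0 | hmpos
    · subst hm0
      have h0 : 0 < t.length := by omega
      rw [show (((0:Nat) + 1 : Nat) : Int) = 1 by norm_num]
      rw [PySem.List.pyRange_one_eq_nil (by norm_num)]
      have ht1 : t.take 1 = [t[0]] := by
        rw [List.take_one]; simp [List.head?_eq_getElem?, List.getElem?_eq_getElem h0]
      simp only [List.foldl_nil, List.range_succ, List.range_zero, List.map_cons, List.map_nil,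
        List.nil_append]
      conv_lhs => rw [← List.take_append_drop 1 t]
      rw [ht1]
      simp [pvS, ht1]
    · have hmt : m < t.length := by omega
      have hcast : (((m + 1 : Nat)) : Int) = ((m:Int)) + 1 := by push_cast; ring
      rw [hcast, PySem.List.pyRange_one_succ_right (by exact_mod_cast hmpos), List.foldl_append]
      rw [ih (by omega)]
      set A := (List.range m).map (fun k => pvS t (k+1)) with hA
      have hAlen : A.length = m := by simp [hA]
      have hdrop : t.drop m = t[m] :: t.drop (m+1) := List.drop_eq_getElem_cons hmt
      simp only [List.foldl_cons, List.foldl_nil]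
      have hget1 : PySem.List.pyGetD (A ++ t.drop m) (m:Int) 0 = t[m] := by
        rw [PySem.List.pyGetD_natCast, hdrop]
        rw [List.getD_eq_getElem?_getD, List.getElem?_append_right (by omega)]
        simp [hAlen, List.getElem?_eq_getElem hmt]
      have hget2 : PySem.List.pyGetD (A ++ t.drop m) ((m:Int) - 1) 0 = pvS t m := by
        have hc2 : ((m:Int) - 1) = ((m - 1 : Nat) : Int) := by omega
        rw [hc2, PySem.List.pyGetD_natCast]
        rw [List.getD_eq_getElem?_getD, List.getElem?_append_left (by omega)]
        rw [hA, List.getElem?_map, List.getElem?_range (show m - 1 < m by omega)]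
        simp only [Option.map_some, Option.getD_some]
        congr 1
        omega
      rw [hget1, hget2]
      rw [PySem.List.pySetD_natCast]
      rw [hdrop, List.range_succ, List.map_append, List.map_cons, List.map_nil]
      have hset : (A ++ t[m] :: t.drop (m+1)).set m (t[m] + pvS t m)
          = A ++ (t[m] + pvS t m) :: t.drop (m+1) := by
        rw [List.set_append]
        simp only [hAlen, lt_irrefl, if_false, Nat.sub_self, List.set_cons_zero]
      rw [hset, pvS_succ t m hmt, add_comm (t[m]) (pvS t m)]
      simp
      exact hA

-- B's inner loop, first component
lemma pv_innerB (f : Int → Int) : ∀ (js : List Int) (acc : List Int) (s : Int),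
    (js.foldl (fun (st : List Int × Int) j => (st.1 ++ [st.2 + f j], st.2 + f j)) (acc, s)).1
    = acc ++ pvG f js s := by
  intro js
  induction js with
  | nil => intro acc s; simp [pvG]
  | cons j js ih => intro acc s; simp only [List.foldl_cons, pvG, ih]; simp

-- the values B appends for start index i are prefix-sum differences
lemma pv_pvG_range (t : List Int) : ∀ (c : Nat) (i : Int) (s : Int), 0 ≤ i → i + c = t.length →
    pvG (fun j => PySem.List.pyGetD t j 0) (PySem.List.pyRange i (t.length : Int) 1) s
    = (PySem.List.pyRange i (t.length : Int) 1).map (fun j => s + pvF t j - pvS t i.toNat) := by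
  intro c
  induction c with
  | zero =>
    intro i s hi hc
    rw [PySem.List.pyRange_one_eq_nil (by omega)]
    simp [pvG]
  | succ c ih =>
    intro i s hi hc
    have hilt : i < (t.length : Int) := by omega
    rw [PySem.List.pyRange_one_cons hilt]
    have hitn : i.toNat < t.length := by omega
    have hget : PySem.List.pyGetD t i 0 = t[i.toNat] :=
      PySem.List.pyGetD_eq_getElem t 0 hi (by simpa using hilt)
    simp only [pvG, List.map_cons, hget]
    have hih := ih (i+1) (s + t[i.toNat]) (by omega) (by omega)
    rw [hih]
    congr 1
    · -- head: s + t[i] = s + pvF t i - pvS t i.toNat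
      simp only [pvF]
      rw [pvS_succ t i.toNat hitn]
      ring
    · -- tail
      apply List.map_congr_left
      intro j _
      have h2 : (i+1).toNat = i.toNat + 1 := by omega
      rw [h2, pvS_succ t i.toNat hitn]
      ring

-- reindexing: A's difference blocks are B's blocks for start indices ≥ 1
lemma pv_shift (t : List Int) : ∀ (c : Nat) (a : Int), 0 ≤ a → a + c = t.length →
    (PySem.List.pyRange a (t.length:Int) 1).flatMap
      (fun i => (PySem.List.pyRange (i+1) (t.length:Int) 1).map (fun j => pvF t j - pvF t i))
    = (PySem.List.pyRange (a+1) (t.length:Int) 1).flatMap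
      (fun i => (PySem.List.pyRange i (t.length:Int) 1).map (fun j => 0 + pvF t j - pvS t i.toNat)) := by
  intro c
  induction c with
  | zero =>
    intro a ha hc
    rw [PySem.List.pyRange_one_eq_nil (le_of_eq (by omega)),
        PySem.List.pyRange_one_eq_nil (by omega)]
    simp
  | succ c ih =>
    intro a ha hc
    have halt : a < (t.length:Int) := by omega
    rw [PySem.List.pyRange_one_cons halt, List.flatMap_cons]
    rcases Nat.eq_zero_or_pos c with hc0 | hcpos
    · -- a + 1 = length: everything degenerates to []
      have h1 : (a+1 : Int) = (t.length:Int) := by omega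
      rw [h1]
      rw [PySem.List.pyRange_one_eq_nil (le_refl _)]
      simp
    · have h1 : a + 1 < (t.length:Int) := by omega
      rw [ih (a+1) (by omega) (by omega)]
      conv_rhs => rw [PySem.List.pyRange_one_cons h1, List.flatMap_cons]
      congr 1
      apply List.map_congr_left
      intro j _
      have hSa : pvS t (a+1).toNat = pvF t a := by
        simp only [pvF]
        congr 1
        omega
      rw [hSa]
      ring

lemma pv_Qeq (t : List Int) :
    (List.range t.length).map (fun k => pvS t (k+1))
    = (PySem.List.pyRange 0 (t.length : Int) 1).map (pvF t) := by
  rw [PySem.List.pyRange_one]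
  simp only [sub_zero, Int.toNat_natCast, List.map_map]
  apply List.map_congr_left
  intro k _
  simp [pvF, Function.comp]

lemma pv_pvS_zero (t : List Int) : pvS t 0 = 0 := rfl

-- the two unsorted answer lists coincide
lemma pv_main (t : List Int) :
    (PySem.List.pyRange 0 (t.length:Int) 1).map (pvF t) ++
      (PySem.List.pyRange 0 (t.length:Int) 1).flatMap
        (fun i => (PySem.List.pyRange (i+1) (t.length:Int) 1).map (fun j => pvF t j - pvF t i))
    = (PySem.List.pyRange 0 (t.length:Int) 1).flatMap
        (fun i => (PySem.List.pyRange i (t.length:Int) 1).map (fun j => 0 + pvF t j - pvS t i.toNat)) := by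
  rcases Nat.eq_zero_or_pos t.length with h0 | hpos
  · rw [PySem.List.pyRange_one_eq_nil (by omega)]
    simp
  · have hlt : (0:Int) < (t.length:Int) := by exact_mod_cast hpos
    conv_rhs => rw [PySem.List.pyRange_one_cons hlt, List.flatMap_cons]
    rw [pv_shift t t.length 0 le_rfl (by omega)]
    congr 1
    apply List.map_congr_left
    intro j _
    simp [pv_pvS_zero]

theorem make_prefix_sum_spec : Claim_equal_make_prefix_sum := by
  intro t _
  unfold Spec_make_prefix_sum make_prefix_sum make_prefix_sum_alt
  simp only [PySem.List.slice_none_none, PySem.List.len_eq]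
  rw [pv_prefA_aux t t.length le_rfl]
  simp only [List.drop_length, List.append_nil]
  rw [pv_Qeq t]
  have hPlen : (((PySem.List.pyRange 0 (t.length:Int) 1).map (pvF t)).length : Int)
      = (t.length : Int) := by
    simp [PySem.List.length_pyRange_one]
  rw [hPlen]
  simp only [pv_innerB (fun j => PySem.List.pyGetD t j 0)]
  simp only [PySem.List.foldl_append_singleton_eq_map]
  rw [PySem.List.foldl_append_eq_flatMap, PySem.List.foldl_append_eq_flatMap, List.nil_append]
  congr 1
  have hA2 : (PySem.List.pyRange 0 (t.length:Int) 1).flatMap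
        (fun i => (PySem.List.pyRange (i+1) (t.length:Int) 1).map
          (fun j => PySem.List.pyGetD ((PySem.List.pyRange 0 (t.length:Int) 1).map (pvF t)) j 0
                  - PySem.List.pyGetD ((PySem.List.pyRange 0 (t.length:Int) 1).map (pvF t)) i 0))
      = (PySem.List.pyRange 0 (t.length:Int) 1).flatMap
        (fun i => (PySem.List.pyRange (i+1) (t.length:Int) 1).map (fun j => pvF t j - pvF t i)) := by
    apply List.flatMap_congr
    intro i hi
    rw [PySem.List.mem_pyRange_one] at hi
    apply List.map_congr_left
    intro j hj
    rw [PySem.List.mem_pyRange_one] at hj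
    rw [PySem.List.pyGetD_map_pyRange_of_nonneg (pvF t) _ j 0 (by omega) (by omega),
        PySem.List.pyGetD_map_pyRange_of_nonneg (pvF t) _ i 0 (by omega) (by omega)]
  have hB2 : (PySem.List.pyRange 0 (t.length:Int) 1).flatMap
        (fun i => pvG (fun j => PySem.List.pyGetD t j 0) (PySem.List.pyRange i (t.length:Int) 1) 0)
      = (PySem.List.pyRange 0 (t.length:Int) 1).flatMap
        (fun i => (PySem.List.pyRange i (t.length:Int) 1).map (fun j => 0 + pvF t j - pvS t i.toNat)) := by
    apply List.flatMap_congr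
    intro i hi
    rw [PySem.List.mem_pyRange_one] at hi
    exact pv_pvG_range t (t.length - i.toNat) i 0 (by omega) (by omega)
  rw [hA2, hB2, pv_main t]
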